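-- pv_equiv track=rewrite | github.com/Widmerpool/Graceful-Trees | graceful.py | gcode
-- ===== SOURCE A (Python) =====
-- import math
--
-- def scale(ident):
--     'Outputs the largest number whose factorial is less than the input'
--     n=ident+1
--     s=0
--     while n > math.factorial(s):
--         s+=1
--     return s-1
--
-- def fcode(ident,size=0):
--     'Takes a number, and the number of entries, and returns the Cantor representation '
--     size=max(scale(ident),size)
--     f=[]
--     m=0
--     while math.factorial(m)<=ident:
--         f.insert(0,(ident%math.factorial(m+1))//math.factorial(m))
--         m+=1
--     return [0]*max(size-len(f),0)+f
--
-- def gcode(ident,size=0):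
--     'Takes the ident of a Stock and uses its Cantor representation to produce '
--     'a list of edges (in the form of pairs of vertices). Guaranteed to be '
--     'graceful, but may not be acyclic'
--     fb=fcode(ident,size)
--     G=[]
--     for i in range(0,len(fb)):
--         G.append((fb[i],fb[i]+i+1))
--     return G
-- ===== SOURCE B (Python) =====
-- def gcode(ident, size=0):
--     'Graceful edge list from the Cantor (factorial-base) representation of ident.'
--     # least-significant-first digits via successive division (no factorials, no scale())
--     lsd = []
--     q, i = ident, 2
--     while q > 0:
--         q, r = divmod(q, i)
--         lsd.append(r)
--         i += 1
--     if ident >= 1: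
--         lsd = [0] + lsd          # the always-zero 0!-position digit
--     fb = [0] * max(size - len(lsd), 0) + lsd[::-1]
--     return [(d, d + i + 1) for i, d in enumerate(fb)]
-- ===== Notes on version B (the rewrite author's own statement) =====
-- stated objective: simpler
-- what changed: Replaces the per-position factorial recomputation and the separate scale() sizing loop by a single successive-division pass with a running quotient (q, r = divmod(q, i)); the padding falls out of the digit count so scale() disappears, and edges are built with one enumerate comprehension.
import Mathlib
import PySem

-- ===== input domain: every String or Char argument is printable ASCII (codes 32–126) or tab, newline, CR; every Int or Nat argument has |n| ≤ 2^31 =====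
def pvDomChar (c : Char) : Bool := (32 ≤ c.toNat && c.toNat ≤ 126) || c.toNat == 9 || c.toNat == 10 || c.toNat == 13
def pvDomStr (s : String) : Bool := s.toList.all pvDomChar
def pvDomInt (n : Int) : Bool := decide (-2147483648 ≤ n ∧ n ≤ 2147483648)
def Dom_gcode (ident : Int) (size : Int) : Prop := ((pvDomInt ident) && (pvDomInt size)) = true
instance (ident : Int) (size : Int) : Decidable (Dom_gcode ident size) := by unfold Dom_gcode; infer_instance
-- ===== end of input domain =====

-- B replaces A's per-position factorial recomputations (and the scale() helper) by one
-- successive-division pass with a running quotient; equal return value, objective: simpler.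

-- ===== PORT A =====
-- scale(): 'while n > math.factorial(s): s += 1'; the counter s is a Nat (it starts at 0 and only grows)
def gcodeScaleLoop (n : Int) (s : Nat) : Nat :=
  if n > (Nat.factorial s : Int) then gcodeScaleLoop n (s + 1) else s
termination_by (n - s).toNat
decreasing_by
  have hs : (s : Int) ≤ (Nat.factorial s : Int) := by exact_mod_cast Nat.self_le_factorial s
  omega

def gcodeScale (ident : Int) : Int := (gcodeScaleLoop (ident + 1) 0 : Int) - 1

-- fcode()'s while loop: f.insert(0, (ident % factorial(m+1)) // factorial(m)); m += 1
def gcodeFLoop (ident : Int) (m : Nat) (f : List Int) : List Int :=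
  if (Nat.factorial m : Int) ≤ ident then
    gcodeFLoop ident (m + 1)
      (PySem.Int.floordiv (PySem.Int.mod ident (Nat.factorial (m + 1) : Int)) (Nat.factorial m : Int) :: f)
  else f
termination_by (ident + 1 - m).toNat
decreasing_by
  have hs : (m : Int) ≤ (Nat.factorial m : Int) := by exact_mod_cast Nat.self_le_factorial m
  omega

def gcodeFcode (ident : Int) (size : Int) : List Int :=
  let size2 := max (gcodeScale ident) size
  let f := gcodeFLoop ident 0 []
  List.replicate (max (size2 - (f.length : Int)) 0).toNat 0 ++ f

-- fb[i] is always in range here, so the pyGetD default 0 is never used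
def gcode (ident : Int) (size : Int) : List (Int × Int) :=
  let fb := gcodeFcode ident size
  (PySem.List.pyRange 0 (fb.length : Int) 1).foldl
    (fun G i => G ++ [(PySem.List.pyGetD fb i 0, PySem.List.pyGetD fb i 0 + i + 1)]) []

-- ===== PORT B =====
-- Source B's successive-division loop: q, r = divmod(q, i); lsd.append(r); i += 1  (i = k + 2)
def gcodeAltDivLoop (q : Int) (k : Nat) (lsd : List Int) : List Int :=
  if q > 0 then
    gcodeAltDivLoop (PySem.Int.floordiv q ((k : Int) + 2)) (k + 1) (lsd ++ [PySem.Int.mod q ((k : Int) + 2)])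
  else lsd
termination_by q.toNat
decreasing_by
  rename_i hq
  rw [show q = ((q.toNat : Nat) : Int) by omega,
    show ((k : Int) + 2) = ((k + 2 : Nat) : Int) by push_cast; ring,
    PySem.Int.floordiv_natCast]
  simp only [Int.toNat_natCast]
  exact Nat.div_lt_self (by omega) (by omega)

def gcode_alt (ident : Int) (size : Int) : List (Int × Int) :=
  let lsd := gcodeAltDivLoop ident 0 []
  let lsd2 := if 1 ≤ ident then 0 :: lsd else lsd   -- the always-zero 0!-position digit
  let fb := List.replicate (max (size - (lsd2.length : Int)) 0).toNat 0 ++ lsd2.reverse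
  (PySem.List.enumerate fb).map (fun p => (p.2, p.2 + p.1 + 1))

-- ===== PRECONDITION & SPEC =====
def Spec_gcode (ident : Int) (size : Int) (out : List (Int × Int)) : Prop := out = gcode_alt ident size
instance (ident : Int) (size : Int) (out : List (Int × Int)) : Decidable (Spec_gcode ident size out) := by unfold Spec_gcode; infer_instance

-- ===== CLAIM (what is proved, stated in full; the proofs are below) =====
def Claim_equal_gcode : Prop := ∀ (ident : Int) (size : Int), Dom_gcode ident size → Spec_gcode ident size (gcode ident size)

-- ===== LEMMAS AND PROOFS =====

-- the accumulator of A's insert(0, …) loop is just appended to the loop's own output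
lemma gcodeFLoop_acc : ∀ (t : Nat) (ident : Int) (m : Nat), (ident + 1 - m).toNat ≤ t →
    ∀ f, gcodeFLoop ident m f = gcodeFLoop ident m [] ++ f := by
  intro t
  induction t with
  | zero =>
    intro ident m h f
    have hs : (m : Int) ≤ (Nat.factorial m : Int) := by exact_mod_cast Nat.self_le_factorial m
    by_cases hc : (Nat.factorial m : Int) ≤ ident
    · omega
    · rw [gcodeFLoop, if_neg hc]; conv_rhs => rw [gcodeFLoop, if_neg hc]
      simp
  | succ t ih =>
    intro ident m h f
    have hs : (m : Int) ≤ (Nat.factorial m : Int) := by exact_mod_cast Nat.self_le_factorial m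
    by_cases hc : (Nat.factorial m : Int) ≤ ident
    · rw [gcodeFLoop, if_pos hc]; conv_rhs => rw [gcodeFLoop, if_pos hc]
      rw [ih ident (m + 1) (by omega), ih ident (m + 1) (by omega)
        [PySem.Int.floordiv (PySem.Int.mod ident (Nat.factorial (m + 1) : Int)) (Nat.factorial m : Int)]]
      simp
    · rw [gcodeFLoop, if_neg hc]; conv_rhs => rw [gcodeFLoop, if_neg hc]
      simp

-- A's digit loop and A's scale loop run over exactly the same m's
lemma gcodeFLoop_len : ∀ (t : Nat) (ident : Int) (m : Nat), (ident + 1 - m).toNat ≤ t →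
    ((gcodeFLoop ident m []).length : Int) + m = (gcodeScaleLoop (ident + 1) m : Int) := by
  intro t
  induction t with
  | zero =>
    intro ident m h
    have hs : (m : Int) ≤ (Nat.factorial m : Int) := by exact_mod_cast Nat.self_le_factorial m
    by_cases hc : (Nat.factorial m : Int) ≤ ident
    · omega
    · rw [gcodeFLoop, if_neg hc, gcodeScaleLoop, if_neg (by omega)]
      simp
  | succ t ih =>
    intro ident m h
    have hs : (m : Int) ≤ (Nat.factorial m : Int) := by exact_mod_cast Nat.self_le_factorial m
    by_cases hc : (Nat.factorial m : Int) ≤ ident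
    · rw [gcodeFLoop, if_pos hc, gcodeScaleLoop, if_pos (by omega)]
      rw [gcodeFLoop_acc t ident (m + 1) (by omega)]
      have := ih ident (m + 1) (by omega)
      simp only [List.length_append, List.length_cons, List.length_nil]
      push_cast at this ⊢
      omega
    · rw [gcodeFLoop, if_neg hc, gcodeScaleLoop, if_neg (by omega)]
      simp

-- bridge: B's running quotient at step m is ident // (m+1)!, and its appended digits are
-- the reverse of what A's loop produces from position m+1 on (stated over Nat a = ident ≥ 1)
lemma gcode_bridge : ∀ (t a m : Nat), 1 ≤ a → a - m ≤ t → ∀ acc,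
    gcodeAltDivLoop ((a / Nat.factorial (m + 1) : Nat) : Int) m acc
      = acc ++ (gcodeFLoop (a : Int) (m + 1) []).reverse := by
  intro t
  induction t with
  | zero =>
    intro a m ha h acc
    have hma : a ≤ m := by omega
    have hfa : a < Nat.factorial (m + 1) := by
      have := Nat.self_le_factorial (m + 1); omega
    rw [gcodeAltDivLoop, gcodeFLoop]
    rw [Nat.div_eq_of_lt hfa]
    rw [if_neg (by simp), if_neg (by exact_mod_cast Nat.not_le.2 hfa)]
    simp
  | succ t ih =>
    intro a m ha h acc
    by_cases hf : Nat.factorial (m + 1) ≤ a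
    · have hm1 : m + 1 ≤ a := le_trans (Nat.self_le_factorial (m + 1)) hf
      have hq : 1 ≤ a / Nat.factorial (m + 1) :=
        (Nat.one_le_div_iff (Nat.factorial_pos (m + 1))).2 hf
      rw [gcodeAltDivLoop, gcodeFLoop]
      rw [if_pos (by exact_mod_cast hq), if_pos (by exact_mod_cast hf)]
      have hcast : ((m : Int) + 2) = ((m + 2 : Nat) : Int) := by push_cast; ring
      have hfac2 : Nat.factorial (m + 1) * (m + 2) = Nat.factorial (m + 2) := by
        rw [Nat.factorial_succ (m + 1)]; ring
      -- the new quotient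
      have hqdiv : PySem.Int.floordiv ((a / Nat.factorial (m + 1) : Nat) : Int) ((m : Int) + 2)
          = ((a / Nat.factorial (m + 2) : Nat) : Int) := by
        rw [hcast, PySem.Int.floordiv_natCast, Nat.div_div_eq_div_mul, hfac2]
      -- the new digit: (a / (m+1)!) % (m+2) = a % (m+2)! / (m+1)!
      have hdig : PySem.Int.mod ((a / Nat.factorial (m + 1) : Nat) : Int) ((m : Int) + 2)
          = PySem.Int.floordiv (PySem.Int.mod (a : Int) (Nat.factorial (m + 2) : Int)) (Nat.factorial (m + 1) : Int) := by
        rw [hcast, PySem.Int.mod_natCast, PySem.Int.mod_natCast, PySem.Int.floordiv_natCast]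
        rw [← Nat.mod_mul_right_div_self a (Nat.factorial (m + 1)) (m + 2), hfac2]
      rw [hqdiv, hdig]
      rw [ih a (m + 1) ha (by omega)]
      rw [gcodeFLoop_acc (a + 1) (a : Int) (m + 1 + 1) (by omega)]
      conv_rhs => rw [gcodeFLoop_acc (a + 1) (a : Int) (m + 1 + 1) (by omega)]
      simp only [show m + 1 + 1 = m + 2 from rfl, List.reverse_append, List.reverse_cons,
        List.reverse_nil, List.nil_append, List.cons_append, List.append_assoc, List.append_nil]
    · rw [gcodeAltDivLoop, gcodeFLoop]
      rw [Nat.div_eq_of_lt (by omega)]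
      rw [if_neg (by simp), if_neg (by exact_mod_cast Nat.not_le.2 (by omega))]
      simp

-- PySem.List.enumerate as a map over range
lemma gcode_enumerate_eq (xs : List Int) : ∀ (s : Int),
    PySem.List.enumerate xs s = (List.range xs.length).map (fun (k : Nat) => (s + (k : Int), xs.getD k 0)) := by
  induction xs with
  | nil => intro s; rfl
  | cons x t iht =>
    intro s
    show (s, x) :: PySem.List.enumerate t (s + 1) = _
    rw [iht (s + 1), List.length_cons, List.range_succ_eq_map, List.map_cons, List.map_map]
    simp only [Nat.cast_zero, add_zero, List.getD_cons_zero, Function.comp_def, List.getD_cons_succ]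
    congr 1
    apply List.map_congr_left
    intro k _
    push_cast
    ring_nf

-- A's index-loop edge builder equals B's enumerate-map edge builder on any digit list
lemma gcode_edges_eq (fb : List Int) :
    (PySem.List.pyRange 0 (fb.length : Int) 1).foldl
      (fun G i => G ++ [(PySem.List.pyGetD fb i 0, PySem.List.pyGetD fb i 0 + i + 1)]) []
    = (PySem.List.enumerate fb).map (fun p => (p.2, p.2 + p.1 + 1)) := by
  rw [PySem.List.foldl_append_singleton_eq_map, PySem.List.pyRange_zero_natCast, List.map_map,
    gcode_enumerate_eq fb 0, List.map_map]
  apply List.map_congr_left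
  intro k hk
  simp only [Function.comp_def, PySem.List.pyGetD_natCast, zero_add]

-- fcode's digit list for ident ≥ 1: first step emits the 0!-digit, which is 0
lemma gcodeFLoop_zero_step (ident : Int) (h : 1 ≤ ident) :
    gcodeFLoop ident 0 [] = gcodeFLoop ident 1 [] ++ [0] := by
  rw [gcodeFLoop]
  rw [if_pos (by simpa using h)]
  have h0 : PySem.Int.floordiv (PySem.Int.mod ident (Nat.factorial 1 : Int)) (Nat.factorial 0 : Int) = 0 := by
    have : PySem.Int.mod ident (Nat.factorial 1 : Int) = 0 := by
      simp [Nat.factorial, PySem.Int.mod]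
    rw [this]; simp [PySem.Int.floordiv]
  rw [h0, gcodeFLoop_acc (ident.toNat + 1) ident 1 (by omega) [0]]

-- ===== VERDICT (by name: the statement is the Claim_ definition above) =====
theorem gcode_spec : Claim_equal_gcode := by
  intro ident size _
  unfold Spec_gcode gcode gcode_alt gcodeFcode
  by_cases h1 : 1 ≤ ident
  · -- positive ident
    obtain ⟨a, rfl⟩ : ∃ a : Nat, ident = (a : Int) := ⟨ident.toNat, by omega⟩
    have ha : 1 ≤ a := by exact_mod_cast h1
    -- B's digit list
    have hdiv : gcodeAltDivLoop (a : Int) 0 [] = (gcodeFLoop (a : Int) 1 []).reverse := by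
      have := gcode_bridge a a 0 ha (by omega) []
      simpa [Nat.factorial] using this
    have hf : gcodeFLoop (a : Int) 0 [] = gcodeFLoop (a : Int) 1 [] ++ [0] :=
      gcodeFLoop_zero_step _ h1
    -- lengths: len f = scaleLoop(ident+1, 0) = scale + 1
    have hlen : ((gcodeFLoop (a : Int) 0 []).length : Int) = (gcodeScaleLoop ((a : Int) + 1) 0 : Int) := by
      have := gcodeFLoop_len (a + 1) (a : Int) 0 (by omega)
      push_cast at this ⊢
      omega
    have hlen1 : 1 ≤ (gcodeFLoop (a : Int) 0 []).length := by
      rw [hf]; simp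
    simp only [if_pos h1]
    rw [hdiv, hf]
    -- the two digit lists coincide
    have hlists : ((0 : Int) :: (gcodeFLoop (a : Int) 1 []).reverse).reverse
        = gcodeFLoop (a : Int) 1 [] ++ [0] := by simp
    rw [hlists]
    -- the two pad counts coincide
    have hpad : (max (max (gcodeScale (a : Int)) size - ((gcodeFLoop (a : Int) 1 [] ++ [0]).length : Int)) 0).toNat
        = (max (size - ((((0 : Int) :: (gcodeFLoop (a : Int) 1 []).reverse)).length : Int)) 0).toNat := by
      unfold gcodeScale
      have hL : ((gcodeFLoop (a : Int) 1 [] ++ [0]).length : Int)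
          = ((gcodeFLoop (a : Int) 0 []).length : Int) := by rw [hf]
      simp only [List.length_cons, List.length_reverse, List.length_append, List.length_cons,
        List.length_nil] at *
      push_cast at *
      omega
    rw [hpad, gcode_edges_eq]
  · -- ident ≤ 0: no digits on either side
    have hz : gcodeFLoop ident 0 [] = [] := by
      rw [gcodeFLoop, if_neg (by simp [Nat.factorial]; omega)]
    have hz' : gcodeAltDivLoop ident 0 [] = [] := by
      rw [gcodeAltDivLoop, if_neg (by omega)]
    have hsc : gcodeScaleLoop (ident + 1) 0 = 0 := by
      rw [gcodeScaleLoop, if_neg (by simp [Nat.factorial]; omega)]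
    simp only [if_neg h1]
    rw [hz, hz', List.reverse_nil]
    have hpad : (max (max (gcodeScale ident) size - (([] : List Int).length : Int)) 0).toNat
        = (max (size - (([] : List Int).length : Int)) 0).toNat := by
      unfold gcodeScale
      rw [hsc]
      simp only [List.length_nil, Nat.cast_zero]
      omega
    rw [hpad, gcode_edges_eq]
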